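-- pv_equiv track=rewrite | github.com/rigaml/job-scraper | app/utils/text_utils.py | join_without_overlap
-- ===== SOURCE A (Python) =====
-- def join_without_overlap(paragraph1: str, paragraph2: str) -> str:
--     """
--     Joins two text paragraphs, resolving any overlap.
--
--     Args:
--         paragraph1 (str): The first text paragraph.
--         paragraph2 (str): The second text paragraph.
--
--     Returns:
--         str: The joined text with no overlap.
--     """
--     if not paragraph1:
--         return paragraph2
--     if not paragraph2:
--         return paragraph1
--
--     len1 = len(paragraph1)
--     len2 = len(paragraph2)
--
--     if len1 < 1:
--         return paragraph2
--     if len2 < 1: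
--         return paragraph1
--
--     for i in range(len1):
--         for j in range(len2):
--             if i + j < len1 - 1:
--                 if paragraph1[i+j] != paragraph2[j]:
--                     break
--             elif i + j == len1 - 1:
--                 if paragraph1[i+j] != paragraph2[j]:
--                     break
--                 else:
--                     return paragraph1 + paragraph2[j+1:]
--             else:
--                 break
--
--     return paragraph1 + paragraph2
-- ===== SOURCE B (Python) =====
-- def join_without_overlap(paragraph1: str, paragraph2: str) -> str:
--     """Join two paragraphs, dropping the longest suffix of paragraph1 that is a prefix of paragraph2."""
--     k = min(len(paragraph1), len(paragraph2))
--     while k > 0 and not paragraph1.endswith(paragraph2[:k]):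
--         k -= 1
--     return paragraph1 + paragraph2[k:]
-- ===== Notes on version B (the rewrite author's own statement) =====
-- stated objective: simpler
-- what changed: Replaces A's nested char-by-char loops (three-way branching, breaks and early return) by a single descending loop over candidate overlap lengths k, testing each with endswith on a slice.
import Mathlib
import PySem

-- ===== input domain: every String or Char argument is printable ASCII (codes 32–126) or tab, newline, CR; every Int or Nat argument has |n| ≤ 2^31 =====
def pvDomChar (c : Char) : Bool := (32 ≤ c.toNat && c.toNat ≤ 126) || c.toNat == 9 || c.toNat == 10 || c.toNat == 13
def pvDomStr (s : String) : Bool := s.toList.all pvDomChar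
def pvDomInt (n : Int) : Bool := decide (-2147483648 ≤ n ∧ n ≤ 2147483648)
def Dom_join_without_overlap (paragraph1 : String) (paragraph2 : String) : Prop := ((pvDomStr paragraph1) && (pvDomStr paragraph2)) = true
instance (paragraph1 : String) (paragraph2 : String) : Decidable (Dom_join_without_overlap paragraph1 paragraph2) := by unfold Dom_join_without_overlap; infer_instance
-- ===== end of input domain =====

-- B replaces A's nested character loops by one descending loop over overlap lengths k
-- tested with endswith on a slice (objective: simpler; same worst-case cost).

-- ===== PORT A =====
-- inner 'for j in range(len2)' loop of A at outer index i, starting from j;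
-- 'some r' models the early 'return r', 'none' models break / loop exhaustion.
def pvInnerA (l1 l2 : List Char) (i j : Nat) : Option (List Char) :=
  if j < l2.length then
    if i + j < l1.length - 1 then
      if l1.getD (i + j) ' ' ≠ l2.getD j ' ' then none
      else pvInnerA l1 l2 i (j + 1)
    else if i + j = l1.length - 1 then
      if l1.getD (i + j) ' ' ≠ l2.getD j ' ' then none
      else some (l1 ++ l2.drop (j + 1))
    else none
  else none
termination_by l2.length - j

-- outer 'for i in range(len1)' loop of A; falls through to p1 + p2.
def pvOuterA (l1 l2 : List Char) (i : Nat) : List Char :=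
  if i < l1.length then
    match pvInnerA l1 l2 i 0 with
    | some r => r
    | none => pvOuterA l1 l2 (i + 1)
  else l1 ++ l2
termination_by l1.length - i

def join_without_overlap (paragraph1 : String) (paragraph2 : String) : String :=
  if paragraph1 = "" then paragraph2
  else if paragraph2 = "" then paragraph1
  else
    let l1 := paragraph1.toList
    let l2 := paragraph2.toList
    if l1.length < 1 then paragraph2
    else if l2.length < 1 then paragraph1
    else String.ofList (pvOuterA l1 l2 0)

-- ===== PORT B =====
-- 'while k > 0 and not paragraph1.endswith(paragraph2[:k]): k -= 1'
def pvBestK (l1 l2 : List Char) : Nat → Nat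
  | 0 => 0
  | k + 1 =>
      if PySem.Chars.endswith l1 (l2.take (k + 1)) then k + 1
      else pvBestK l1 l2 k

def join_without_overlap_alt (paragraph1 : String) (paragraph2 : String) : String :=
  let l1 := paragraph1.toList
  let l2 := paragraph2.toList
  let k := pvBestK l1 l2 (min l1.length l2.length)
  String.ofList (l1 ++ l2.drop k)

-- ===== PRECONDITION & SPEC =====
def Spec_join_without_overlap (paragraph1 : String) (paragraph2 : String) (out : String) : Prop := out = join_without_overlap_alt paragraph1 paragraph2
instance (paragraph1 : String) (paragraph2 : String) (out : String) : Decidable (Spec_join_without_overlap paragraph1 paragraph2 out) := by unfold Spec_join_without_overlap; infer_instance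

-- ===== CLAIM (what is proved, stated in full; the proofs are below) =====
def Claim_equal_join_without_overlap : Prop := ∀ (paragraph1 : String) (paragraph2 : String), Dom_join_without_overlap paragraph1 paragraph2 → Spec_join_without_overlap paragraph1 paragraph2 (join_without_overlap paragraph1 paragraph2)

-- ===== LEMMAS AND PROOFS =====


-- charwise equality of A's inner scan = slice equality used by B's endswith test
theorem pvDropEqTake (l1 l2 : List Char) (i : Nat) (h2 : l1.length - i ≤ l2.length) :
    l1.drop i = l2.take (l1.length - i) ↔
      ∀ t, i + t < l1.length → l1.getD (i + t) ' ' = l2.getD t ' ' := by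
  constructor
  · intro h t ht
    have ht2 : t < l2.length := by omega
    have h1 : t < (List.drop i l1).length := by simp; omega
    have key : l1[i + t]'ht = l2[t]'ht2 := by
      calc l1[i + t]'ht = (List.drop i l1)[t]'h1 := List.getElem_drop.symm
        _ = (List.take (l1.length - i) l2)[t]'(h ▸ h1) := List.getElem_of_eq h h1
        _ = l2[t]'ht2 := List.getElem_take
    rw [List.getD_eq_getElem _ _ ht, List.getD_eq_getElem _ _ ht2]
    exact key
  · intro h
    apply List.ext_getElem
    · simp; omega
    · intro n hn1 hn2
      simp only [List.getElem_drop, List.getElem_take]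
      have hl : i + n < l1.length := by simp at hn1; omega
      have hr : n < l2.length := by omega
      have := h n hl
      rwa [List.getD_eq_getElem _ _ hl, List.getD_eq_getElem _ _ hr] at this

-- characterization of A's inner loop: it returns (the joined string) exactly when
-- the suffix of l1 starting at i matches l2 character by character to the end of l1.
theorem pvInnerA_eq_some (l1 l2 : List Char) (i : Nat) :
    ∀ j r, i + j < l1.length →
      (pvInnerA l1 l2 i j = some r ↔
        (l1.length - i ≤ l2.length ∧
         (∀ t, j ≤ t → i + t < l1.length → l1.getD (i + t) ' ' = l2.getD t ' ') ∧
         r = l1 ++ l2.drop (l1.length - i))) := by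
  intro j r
  fun_induction pvInnerA l1 l2 i j with
  | case1 j hj hlt hne =>
    intro hij
    constructor
    · intro h; simp at h
    · rintro ⟨hm, hc, hr⟩
      exact absurd (hc j le_rfl hij) hne
  | case2 j hj hlt hne ih =>
    intro hij
    rw [not_ne_iff] at hne
    rw [ih (by omega)]
    constructor
    · rintro ⟨hm, hc, hr⟩
      refine ⟨hm, ?_, hr⟩
      intro t ht htl
      rcases Nat.eq_or_lt_of_le ht with h | h
      · subst h; exact hne
      · exact hc t h htl
    · rintro ⟨hm, hc, hr⟩
      exact ⟨hm, fun t ht htl => hc t (by omega) htl, hr⟩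
  | case3 j hj hlt heq hne =>
    intro hij
    constructor
    · intro h; simp at h
    · rintro ⟨hm, hc, hr⟩
      exact absurd (hc j le_rfl hij) hne
  | case4 j hj hlt heq hne =>
    intro hij
    rw [not_ne_iff] at hne
    have hm : l1.length - i = j + 1 := by omega
    rw [Option.some.injEq]
    constructor
    · intro h
      refine ⟨by omega, ?_, by rw [hm, ← h]⟩
      intro t ht htl
      have : t = j := by omega
      subst this; exact hne
    · rintro ⟨_, _, hr⟩
      rw [hr, hm]
  | case5 j hj hlt heq =>
    intro hij
    exact absurd hij (by omega)
  | case6 j hj =>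
    intro hij
    constructor
    · intro h; simp at h
    · rintro ⟨hm, _, _⟩; omega

-- A's outer loop equals the tail of B's descending search over overlap lengths
theorem pvOuterA_eq (l1 l2 : List Char) :
    ∀ i, i ≤ l1.length →
      pvOuterA l1 l2 i = l1 ++ l2.drop (pvBestK l1 l2 (min (l1.length - i) l2.length)) := by
  intro i
  fun_induction pvOuterA l1 l2 i with
  | case1 i hlt r heq =>
    intro _
    obtain ⟨hm, hc, hr⟩ := (pvInnerA_eq_some l1 l2 i 0 r (by omega)).mp heq
    obtain ⟨k, hk⟩ : ∃ k, l1.length - i = k + 1 := ⟨l1.length - i - 1, by omega⟩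
    have hmin : min (l1.length - i) l2.length = l1.length - i := by omega
    have hdrop : l1.drop i = l2.take (l1.length - i) :=
      (pvDropEqTake l1 l2 i hm).mpr (fun t ht => hc t (Nat.zero_le t) ht)
    have hsuff : PySem.Chars.endswith l1 (l2.take (k + 1)) = true := by
      rw [PySem.Chars.endswith_iff, ← hk, ← hdrop]
      exact List.drop_suffix i l1
    rw [hmin, hk, pvBestK, hsuff, if_pos rfl, hr, hk]
  | case2 i hlt heq ih =>
    intro _
    rw [ih (by omega)]
    have hno : ¬ (l1.length - i ≤ l2.length ∧
        ∀ t, 0 ≤ t → i + t < l1.length → l1.getD (i + t) ' ' = l2.getD t ' ') := by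
      rintro ⟨hm, hc⟩
      have := (pvInnerA_eq_some l1 l2 i 0 (l1 ++ l2.drop (l1.length - i)) (by omega)).mpr
        ⟨hm, hc, rfl⟩
      rw [this] at heq
      simp at heq
    by_cases hle : l1.length - i ≤ l2.length
    · obtain ⟨k, hk⟩ : ∃ k, l1.length - i = k + 1 := ⟨l1.length - i - 1, by omega⟩
      have hmin : min (l1.length - i) l2.length = k + 1 := by omega
      have hmin' : min (l1.length - (i + 1)) l2.length = k := by omega
      rw [hmin, hmin', pvBestK]
      have hsuff : PySem.Chars.endswith l1 (l2.take (k + 1)) = false := by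
        rw [Bool.eq_false_iff]
        intro hsw
        rw [PySem.Chars.endswith_iff] at hsw
        have hlen : (l2.take (k + 1)).length = k + 1 := by simp; omega
        rw [List.suffix_iff_eq_drop, hlen] at hsw
        have hdi : l1.length - (k + 1) = i := by omega
        rw [hdi] at hsw
        have hdt : l1.drop i = l2.take (l1.length - i) := by rw [hk]; exact hsw.symm
        exact hno ⟨hle, fun t _ ht => (pvDropEqTake l1 l2 i hle).mp hdt t ht⟩
      rw [hsuff]
      simp
    · have hmin : min (l1.length - i) l2.length = l2.length := by omega
      have hmin' : min (l1.length - (i + 1)) l2.length = l2.length := by omega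
      rw [hmin, hmin']
  | case3 i hlt =>
    intro hle
    have : l1.length - i = 0 := by omega
    rw [this]
    simp [pvBestK]

-- ===== VERDICT (by name: the statement is the Claim_ definition above) =====
theorem join_without_overlap_spec : Claim_equal_join_without_overlap := by
  intro p1 p2 _
  unfold Spec_join_without_overlap join_without_overlap join_without_overlap_alt
  by_cases h1 : p1 = ""
  · subst h1
    simp [pvBestK, String.ofList_toList]
  · rw [if_neg h1]
    by_cases h2 : p2 = ""
    · subst h2
      simp [pvBestK, String.ofList_toList]
    · rw [if_neg h2]
      have hl1 : p1.toList ≠ [] := by simpa using h1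
      have hl2 : p2.toList ≠ [] := by simpa using h2
      have n1 : ¬ p1.toList.length < 1 := by
        have := List.length_pos_iff.mpr hl1; omega
      have n2 : ¬ p2.toList.length < 1 := by
        have := List.length_pos_iff.mpr hl2; omega
      simp only [n1, n2, if_false]
      rw [pvOuterA_eq p1.toList p2.toList 0 (Nat.zero_le _)]
      simp
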